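-- pv_equiv track=rewrite | github.com/wboxxx/Dopsound | magicstomp_sysex.py | build_parameter_message
-- ===== SOURCE A (Python) =====
-- from typing import Iterable, List
--
-- SYSEX_HEADER: List[int] = [0xF0, 0x43, 0x7D, 0x40, 0x55, 0x42]
--
-- PARAMETER_SEND_CMD: int = 0x20
--
-- SYSEX_FOOTER: int = 0xF7
--
-- PATCH_COMMON_LENGTH: int = 0x20
--
-- def calculate_checksum(data: Iterable[int]) -> int:
--     """Return the 7-bit Yamaha checksum for *data*.
--
--     MagicstompFrenzy computes the checksum by summing the payload bytes and
--     negating the result on 7 bits.  Adopting the exact same implementation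
--     avoids the XOR variant that had slipped into some utilities.
--     """
--
--     total = 0
--     for byte in data:
--         total += byte
--     return (-total) & 0x7F
--
-- def build_parameter_message(global_offset: int, values: Iterable[int]) -> List[int]:
--     """Build a SysEx message that writes *values* at *global_offset*.
--
--     Args:
--         global_offset: Absolute offset inside the Magicstomp patch (0-158).
--         values: Sequence of 7-bit values to store starting at *global_offset*.
--     """
--
--     message: List[int] = []
--     message.extend(SYSEX_HEADER)
--     message.append(PARAMETER_SEND_CMD)
--
--     if global_offset < PATCH_COMMON_LENGTH:
--         section = 0x00
--         section_offset = global_offset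
--     else:
--         section = 0x01
--         section_offset = global_offset - PATCH_COMMON_LENGTH
--
--     message.append(section)
--     message.append(section_offset)
--
--     for value in values:
--         message.append(value & 0x7F)
--
--     checksum = calculate_checksum(message[1:])
--     message.append(checksum)
--     message.append(SYSEX_FOOTER)
--     return message
-- ===== SOURCE B (Python) =====
-- SYSEX_HEADER = [0xF0, 0x43, 0x7D, 0x40, 0x55, 0x42]
-- PARAMETER_SEND_CMD = 0x20
-- SYSEX_FOOTER = 0xF7
-- PATCH_COMMON_LENGTH = 0x20
--
--
-- def build_parameter_message(global_offset, values):
--     """Single pass: thread a running checksum total while emitting the body bytes."""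
--     if global_offset < PATCH_COMMON_LENGTH:
--         section = 0x00
--         section_offset = global_offset
--     else:
--         section = 0x01
--         section_offset = global_offset - PATCH_COMMON_LENGTH
--
--     # sum of the header bytes after F0, plus the command byte, section and offset
--     total = 0x43 + 0x7D + 0x40 + 0x55 + 0x42 + PARAMETER_SEND_CMD + section + section_offset
--     body = []
--     for value in values:
--         b = value & 0x7F
--         body.append(b)
--         total += b
--
--     return (SYSEX_HEADER + [PARAMETER_SEND_CMD, section, section_offset]
--             + body + [(-total) & 0x7F, SYSEX_FOOTER])
-- ===== Notes on version B (the rewrite author's own statement) =====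
-- stated objective: alternative
-- what changed: B threads a running checksum total through the single emission loop (seeded with the constant header/command sum) instead of building the list and then re-summing message[1:] in a second pass via calculate_checksum.
import Mathlib
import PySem

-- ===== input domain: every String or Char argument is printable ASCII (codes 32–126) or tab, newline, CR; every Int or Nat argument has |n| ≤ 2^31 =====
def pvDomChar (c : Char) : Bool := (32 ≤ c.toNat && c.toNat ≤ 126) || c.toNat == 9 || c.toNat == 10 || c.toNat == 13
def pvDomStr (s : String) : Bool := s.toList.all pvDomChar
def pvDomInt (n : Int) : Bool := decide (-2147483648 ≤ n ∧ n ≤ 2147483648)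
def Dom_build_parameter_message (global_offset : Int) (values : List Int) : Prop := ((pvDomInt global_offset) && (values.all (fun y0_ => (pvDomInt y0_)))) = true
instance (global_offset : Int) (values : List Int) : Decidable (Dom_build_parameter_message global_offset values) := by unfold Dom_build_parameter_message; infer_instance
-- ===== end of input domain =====

-- B builds the message in one pass, threading a running checksum total; A builds the list and then re-sums message[1:]. Alternative decomposition, same cost.

-- ===== PORT A =====
-- helper: calculate_checksum(data) = (-sum(data)) & 0x7F
def calculate_checksum (data : List Int) : Int :=
  let total := data.foldl (fun t b => t + b) 0
  PySem.Int.band (-total) 0x7F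

def build_parameter_message (global_offset : Int) (values : List Int) : List Int :=
  let message : List Int := []
  let message := message ++ [0xF0, 0x43, 0x7D, 0x40, 0x55, 0x42]   -- SYSEX_HEADER
  let message := message ++ [0x20]                                  -- PARAMETER_SEND_CMD
  let sect : Int := if global_offset < 0x20 then 0x00 else 0x01
  let sect_offset : Int := if global_offset < 0x20 then global_offset else global_offset - 0x20
  let message := message ++ [sect]
  let message := message ++ [sect_offset]
  let message := values.foldl (fun m v => m ++ [PySem.Int.band v 0x7F]) message
  let checksum := calculate_checksum (message.drop 1)               -- message[1:]
  message ++ [checksum, 0xF7]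

-- ===== PORT B =====
def build_parameter_message_alt (global_offset : Int) (values : List Int) : List Int :=
  let sect : Int := if global_offset < 0x20 then 0x00 else 0x01
  let sect_offset : Int := if global_offset < 0x20 then global_offset else global_offset - 0x20
  let init : Int := 0x43 + 0x7D + 0x40 + 0x55 + 0x42 + 0x20 + sect + sect_offset
  let bt := values.foldl
    (fun (bt : List Int × Int) v =>
      let b := PySem.Int.band v 0x7F
      (bt.1 ++ [b], bt.2 + b))
    ([], init)
  [0xF0, 0x43, 0x7D, 0x40, 0x55, 0x42, 0x20, sect, sect_offset]
    ++ bt.1 ++ [PySem.Int.band (-bt.2) 0x7F, 0xF7]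

-- ===== PRECONDITION & SPEC =====
def Spec_build_parameter_message (global_offset : Int) (values : List Int) (out : List Int) : Prop := out = build_parameter_message_alt global_offset values
instance (global_offset : Int) (values : List Int) (out : List Int) : Decidable (Spec_build_parameter_message global_offset values out) := by unfold Spec_build_parameter_message; infer_instance

-- ===== CLAIM (what is proved, stated in full; the proofs are below) =====
def Claim_equal_build_parameter_message : Prop := ∀ (global_offset : Int) (values : List Int), Dom_build_parameter_message global_offset values → Spec_build_parameter_message global_offset values (build_parameter_message global_offset values)

-- ===== LEMMAS AND PROOFS =====

-- B's pair fold = (accumulated masked bytes, accumulated total).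
theorem foldl_pair (values : List Int) (acc : List Int) (t : Int) :
    values.foldl
      (fun (bt : List Int × Int) v =>
        let b := PySem.Int.band v 0x7F
        (bt.1 ++ [b], bt.2 + b))
      (acc, t)
      = (acc ++ values.map (fun v => PySem.Int.band v 0x7F),
         t + (values.map (fun v => PySem.Int.band v 0x7F)).sum) := by
  induction values generalizing acc t with
  | nil => simp
  | cons v vs ih =>
    simp only [List.foldl, List.map, ih, List.sum_cons, Prod.mk.injEq]
    exact ⟨by simp, by ring⟩

-- a plain running-sum loop is the list sum
theorem foldl_sum (l : List Int) (t : Int) :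
    l.foldl (fun t b => t + b) t = t + l.sum := by
  induction l generalizing t with
  | nil => simp
  | cons x xs ih => simp only [List.foldl, List.sum_cons, ih]; ring

theorem build_parameter_message_eq (global_offset : Int) (values : List Int) :
    build_parameter_message global_offset values
      = build_parameter_message_alt global_offset values := by
  simp only [build_parameter_message, build_parameter_message_alt, calculate_checksum,
    foldl_pair, PySem.List.foldl_append_singleton_eq_map]
  simp only [List.nil_append, List.cons_append, List.drop, foldl_sum, List.sum_cons]
  congr 2
  ring_nf

-- ===== VERDICT (by name: the statement is the Claim_ definition above) =====
theorem build_parameter_message_spec : Claim_equal_build_parameter_message := by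
  intro go vs _
  exact build_parameter_message_eq go vs
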